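-- pv_equiv track=rewrite | github.com/sroedger/advent | puzzles/2015_01/main.py | first_basement
-- ===== SOURCE A (Python) =====
-- def first_basement(item: str) -> int:
--     floor = 0
--     for index, char in enumerate(item):
--         if char == "(":
--             floor += 1
--         elif char == ")":
--             floor -= 1
--         if floor < 0:
--             return index + 1
--     return 0
-- ===== SOURCE B (Python) =====
-- def first_basement(item: str) -> int:
--     # Phase 1: per-character step values, then running totals (prefix sums).
--     steps = [(c == "(") - (c == ")") for c in item]
--     totals = []
--     t = 0
--     for s in steps:
--         t += s
--         totals.append(t)
--     # Phase 2: first index whose running total is below zero, 1-based; 0 if none.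
--     return next((i + 1 for i, total in enumerate(totals) if total < 0), 0)
-- ===== Notes on version B (the rewrite author's own statement) =====
-- stated objective: idiomatic
-- what changed: Replaces A's single stateful loop with early return by a two-phase decomposition: map characters to step values, build the prefix-sum sequence, then find the first below-zero index with next(...) over a generator.
import Mathlib
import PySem

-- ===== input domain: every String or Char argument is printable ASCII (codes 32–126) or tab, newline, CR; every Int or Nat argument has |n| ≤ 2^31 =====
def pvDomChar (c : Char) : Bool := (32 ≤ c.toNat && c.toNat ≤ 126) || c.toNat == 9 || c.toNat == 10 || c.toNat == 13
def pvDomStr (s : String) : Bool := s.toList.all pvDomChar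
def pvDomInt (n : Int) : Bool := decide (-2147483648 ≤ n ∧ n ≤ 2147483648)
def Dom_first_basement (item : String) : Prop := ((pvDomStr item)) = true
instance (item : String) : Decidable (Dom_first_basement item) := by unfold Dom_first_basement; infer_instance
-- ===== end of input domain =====

-- B replaces A's single stateful loop (early return) with a two-phase decomposition:
-- prefix-sum sequence first, then a search for the first below-zero index.


-- ===== PORT A =====
-- A's loop: state (floor, index), early return index+1 when floor < 0.
def fbGoA : List Char → Int → Int → Int
  | [], _, _ => 0
  | c :: rest, floor, index =>
    let floor' := if c = '(' then floor + 1 else if c = ')' then floor - 1 else floor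
    if floor' < 0 then index + 1 else fbGoA rest floor' (index + 1)

def first_basement (item : String) : Int := fbGoA item.toList 0 0

-- ===== PORT B =====
-- B phase 1a: step values (bool − bool in Python).
def fbSteps (l : List Char) : List Int :=
  l.map (fun c => (if c = '(' then (1 : Int) else 0) - (if c = ')' then 1 else 0))

-- B phase 1b: running totals (the loop appending t to totals).
def fbTotals : List Int → Int → List Int
  | [], _ => []
  | s :: rest, t => (t + s) :: fbTotals rest (t + s)

-- B phase 2: next((i+1 for i, total in enumerate(totals) if total < 0), 0).
def fbFind : List Int → Int → Int
  | [], _ => 0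
  | total :: rest, i => if total < 0 then i + 1 else fbFind rest (i + 1)

def first_basement_alt (item : String) : Int :=
  fbFind (fbTotals (fbSteps item.toList) 0) 0

-- ===== PRECONDITION & SPEC =====
def Spec_first_basement (item : String) (out : Int) : Prop := out = first_basement_alt item
instance (item : String) (out : Int) : Decidable (Spec_first_basement item out) := by unfold Spec_first_basement; infer_instance

-- ===== CLAIM =====
def Claim_equal_first_basement : Prop := ∀ (item : String), Dom_first_basement item → Spec_first_basement item (first_basement item)

-- ===== LEMMAS AND PROOFS =====
theorem fbGoA_eq (l : List Char) : ∀ (floor index : Int),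
    fbGoA l floor index = fbFind (fbTotals (fbSteps l) floor) index := by
  induction l with
  | nil => intro floor index; rfl
  | cons c rest ih =>
    intro floor index
    have hstep : (if c = '(' then floor + 1 else if c = ')' then floor - 1 else floor)
        = floor + ((if c = '(' then (1 : Int) else 0) - (if c = ')' then 1 else 0)) := by
      by_cases h1 : c = '(' <;> by_cases h2 : c = ')' <;> simp [h1, h2] <;> omega
    simp only [fbGoA, fbSteps, List.map, fbTotals, fbFind, hstep]
    by_cases hneg : floor + ((if c = '(' then (1 : Int) else 0) - (if c = ')' then 1 else 0)) < 0
    · simp [hneg]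
    · simp only [if_neg hneg]
      simpa [fbSteps] using ih (floor + ((if c = '(' then (1 : Int) else 0) - (if c = ')' then 1 else 0))) (index + 1)

-- ===== VERDICT =====
theorem first_basement_spec : Claim_equal_first_basement := by
  intro item _
  show first_basement item = first_basement_alt item
  exact fbGoA_eq item.toList 0 0
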